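-- pv_equiv track=rewrite | github.com/ypwcharles/index-tts | tools/batch_infer.py | build_worker_partitions
-- ===== SOURCE A (Python) =====
-- from typing import Any, Callable, Dict, List, Optional, Sequence, Tuple
--
-- def build_worker_partitions(
--     tasks: Sequence[Tuple[int, str, str]],
--     num_workers: int,
--     group_by_speaker: bool,
-- ) -> List[List[Tuple[int, str, str]]]:
--     if num_workers < 1:
--         num_workers = 1
--     partitions: List[List[Tuple[int, str, str]]] = [[] for _ in range(num_workers)]
--     if not tasks:
--         return partitions
--
--     if not group_by_speaker or num_workers == 1:
--         for idx, task in enumerate(tasks):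
--             partitions[idx % num_workers].append(task)
--         for bucket in partitions:
--             bucket.sort(key=lambda item: item[0])
--         return partitions
--
--     speaker_tasks: Dict[str, List[Tuple[int, str, str]]] = {}
--     for task in tasks:
--         speaker_tasks.setdefault(task[1], []).append(task)
--
--     # compute weight per speaker: sum of character length to approximate workload
--     def speaker_weight(items: List[Tuple[int, str, str]]) -> int:
--         return sum(len(entry[2]) for entry in items)
--
--     ordered_speakers = sorted(
--         speaker_tasks.items(), key=lambda kv: speaker_weight(kv[1]), reverse=True
--     )
--
--     loads = [0] * num_workers
--     for speaker, items in ordered_speakers: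
--         target_worker = min(range(num_workers), key=lambda w: loads[w])
--         partitions[target_worker].extend(items)
--         loads[target_worker] += speaker_weight(items)
--
--     for bucket in partitions:
--         bucket.sort(key=lambda item: item[0])
--
--     return partitions
-- ===== SOURCE B (Python) =====
-- from typing import Dict, List, Sequence, Tuple
--
--
-- def build_worker_partitions(
--     tasks: Sequence[Tuple[int, str, str]],
--     num_workers: int,
--     group_by_speaker: bool,
-- ) -> List[List[Tuple[int, str, str]]]:
--     if num_workers < 1:
--         num_workers = 1
--     if not tasks:
--         return [[] for _ in range(num_workers)]
--
--     if not group_by_speaker or num_workers == 1: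
--         # round-robin assignment is exactly the strided slices of the task list
--         return [sorted(tasks[i::num_workers], key=lambda t: t[0]) for i in range(num_workers)]
--
--     # one pass: group tasks by speaker and cache each speaker's total text length
--     buckets: Dict[str, List[Tuple[int, str, str]]] = {}
--     weights: Dict[str, int] = {}
--     for task in tasks:
--         spk = task[1]
--         if spk in buckets:
--             buckets[spk].append(task)
--             weights[spk] += len(task[2])
--         else:
--             buckets[spk] = [task]
--             weights[spk] = len(task[2])
--
--     ordered = sorted(buckets.items(), key=lambda kv: weights[kv[0]], reverse=True)
--
--     # least-loaded assignment via a sorted queue of (load, worker) pairs: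
--     # the head is always the least-loaded worker (smallest index on ties)
--     queue = [(0, w) for w in range(num_workers)]
--     assigned: List[List[Tuple[int, str, str]]] = [[] for _ in range(num_workers)]
--     for spk, items in ordered:
--         load, w = queue.pop(0)
--         assigned[w].extend(items)
--         entry = (load + weights[spk], w)
--         i = 0
--         while i < len(queue) and queue[i] < entry:
--             i += 1
--         queue.insert(i, entry)
--
--     return [sorted(bucket, key=lambda t: t[0]) for bucket in assigned]
-- ===== Notes on version B (the rewrite author's own statement) =====
-- stated objective: alternative
-- what changed: B groups tasks and caches each speaker's weight in one pass, replaces the per-speaker argmin scan over a loads array by a queue of (load, worker) pairs kept sorted so the least-loaded worker is popped from the front, and builds the round-robin branch from strided slices tasks[i::num_workers] instead of an indexed append loop.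
import Mathlib
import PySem

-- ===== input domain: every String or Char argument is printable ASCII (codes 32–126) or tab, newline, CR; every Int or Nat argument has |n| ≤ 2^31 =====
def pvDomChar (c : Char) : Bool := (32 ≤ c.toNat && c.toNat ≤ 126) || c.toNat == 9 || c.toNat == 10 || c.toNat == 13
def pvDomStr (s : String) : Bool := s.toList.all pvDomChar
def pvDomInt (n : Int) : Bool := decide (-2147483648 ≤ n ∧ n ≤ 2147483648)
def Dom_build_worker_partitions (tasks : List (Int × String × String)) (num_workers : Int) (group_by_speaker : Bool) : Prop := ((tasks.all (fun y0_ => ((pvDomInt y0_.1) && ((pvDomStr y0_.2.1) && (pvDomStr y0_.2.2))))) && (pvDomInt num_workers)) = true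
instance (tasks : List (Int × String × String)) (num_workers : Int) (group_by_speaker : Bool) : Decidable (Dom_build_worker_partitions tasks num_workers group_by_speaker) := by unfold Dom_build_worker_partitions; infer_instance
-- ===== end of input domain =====

-- B replaces A's per-speaker argmin scan over a loads array by a sorted (load, worker) queue,
-- caches speaker weights in one grouping pass, and builds the round-robin branch from strided
-- slices instead of an indexed append loop; same return value everywhere (alternative structure).


-- ===== PORT A =====

-- helper `speaker_weight`: sum of len(entry[2]) over the items
def pvSpeakerWeight (items : List (Int × String × String)) : Int :=
  (items.map (fun entry => PySem.Str.len entry.2.2)).sum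

def build_worker_partitions (tasks : List (Int × String × String)) (num_workers : Int) (group_by_speaker : Bool) : List (List (Int × String × String)) :=
  let num_workers := if num_workers < 1 then 1 else num_workers
  let partitions : List (List (Int × String × String)) :=
    (PySem.List.pyRange 0 num_workers 1).map (fun _ => [])
  if tasks = [] then partitions
  else if !group_by_speaker || num_workers == 1 then
    let partitions := (PySem.List.enumerate tasks).foldl
      (fun ps p =>
        PySem.List.pySetD ps (PySem.Int.mod p.1 num_workers)
          (PySem.List.pyGetD ps (PySem.Int.mod p.1 num_workers) [] ++ [p.2])) partitions
    partitions.map (fun bucket => PySem.List.sorted bucket (fun item => item.1) false)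
  else
    let speaker_tasks : PySem.Dict String (List (Int × String × String)) :=
      tasks.foldl (fun d task => d.modify task.2.1 [] (· ++ [task])) PySem.Dict.empty
    let ordered_speakers :=
      PySem.List.sorted speaker_tasks.items (fun kv => pvSpeakerWeight kv.2) true
    let loads : List Int := PySem.List.pyRepeat [0] num_workers
    let st := ordered_speakers.foldl
      (fun (st : List (List (Int × String × String)) × List Int) kv =>
        -- min(range(num_workers), key=...); the range is nonempty, `minD` is its total form
        let target := PySem.List.minD (PySem.List.pyRange 0 num_workers 1)
          (fun w => PySem.List.pyGetD st.2 w 0) 0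
        (PySem.List.pySetD st.1 target (PySem.List.pyGetD st.1 target [] ++ kv.2),
         PySem.List.pySetD st.2 target (PySem.List.pyGetD st.2 target 0 + pvSpeakerWeight kv.2)))
      (partitions, loads)
    st.1.map (fun bucket => PySem.List.sorted bucket (fun item => item.1) false)

-- ===== PORT B =====

-- B helper: the hand-written `while i < len(queue) and queue[i] < entry` + insert — linear
-- insertion into the queue kept sorted by Python's lexicographic `<` on (Int, Int) pairs
def pvInsortLex (entry : Int × Int) : List (Int × Int) → List (Int × Int)
  | [] => [entry]
  | q :: qs =>
    if q.1 < entry.1 ∨ (q.1 = entry.1 ∧ q.2 < entry.2) then q :: pvInsortLex entry qs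
    else entry :: q :: qs

def build_worker_partitions_alt (tasks : List (Int × String × String)) (num_workers : Int) (group_by_speaker : Bool) : List (List (Int × String × String)) :=
  let num_workers := if num_workers < 1 then 1 else num_workers
  if tasks = [] then (PySem.List.pyRange 0 num_workers 1).map (fun _ => [])
  else if !group_by_speaker || num_workers == 1 then
    (PySem.List.pyRange 0 num_workers 1).map (fun i =>
      PySem.List.sorted ((PySem.List.slice? tasks (some i) none num_workers).getD [])
        (fun t => t.1) false)
  else
    let bw := tasks.foldl
      (fun (bw : PySem.Dict String (List (Int × String × String)) × PySem.Dict String Int) task =>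
        let spk := task.2.1
        if bw.1.contains spk then
          (bw.1.modify spk [] (· ++ [task]), bw.2.modify spk 0 (· + PySem.Str.len task.2.2))
        else
          (bw.1.insert spk [task], bw.2.insert spk (PySem.Str.len task.2.2)))
      (PySem.Dict.empty, PySem.Dict.empty)
    let buckets := bw.1
    let weights := bw.2
    let ordered := PySem.List.sorted buckets.items (fun kv => weights.getD kv.1 0) true
    let queue : List (Int × Int) := (PySem.List.pyRange 0 num_workers 1).map (fun w => (0, w))
    let assigned : List (List (Int × String × String)) :=
      (PySem.List.pyRange 0 num_workers 1).map (fun _ => [])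
    let st := ordered.foldl
      (fun (st : List (List (Int × String × String)) × List (Int × Int)) kv =>
        -- queue.pop(0); the queue always holds one pair per worker, so it is nonempty
        let lw := st.2.headD (0, 0)
        let rest := st.2.tail
        (PySem.List.pySetD st.1 lw.2 (PySem.List.pyGetD st.1 lw.2 [] ++ kv.2),
         pvInsortLex (lw.1 + weights.getD kv.1 0, lw.2) rest))
      (assigned, queue)
    st.1.map (fun bucket => PySem.List.sorted bucket (fun t => t.1) false)

-- ===== PRECONDITION & SPEC =====
def Spec_build_worker_partitions (tasks : List (Int × String × String)) (num_workers : Int) (group_by_speaker : Bool) (out : List (List (Int × String × String))) : Prop := out = build_worker_partitions_alt tasks num_workers group_by_speaker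
instance (tasks : List (Int × String × String)) (num_workers : Int) (group_by_speaker : Bool) (out : List (List (Int × String × String))) : Decidable (Spec_build_worker_partitions tasks num_workers group_by_speaker out) := by unfold Spec_build_worker_partitions; infer_instance

-- ===== CLAIM (what is proved, stated in full; the proofs are below) =====
def Claim_equal_build_worker_partitions : Prop := ∀ (tasks : List (Int × String × String)) (num_workers : Int) (group_by_speaker : Bool), Dom_build_worker_partitions tasks num_workers group_by_speaker → Spec_build_worker_partitions tasks num_workers group_by_speaker (build_worker_partitions tasks num_workers group_by_speaker)

-- ===== LEMMAS AND PROOFS =====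

-- ---------- shared abbreviations for the proofs ----------

-- strict lexicographic order on (load, worker) pairs (Python's `<` on int 2-tuples,
-- with distinct workers so ties on both components never arise)
def pvLexLt (a b : Int × Int) : Prop := a.1 < b.1 ∨ (a.1 = b.1 ∧ a.2 < b.2)

-- elements of a list at positions ≡ r (mod m), i.e. the strided selection
def pvStride : List (Int × String × String) → Nat → Nat → List (Int × String × String)
  | [], _, _ => []
  | t :: ts, 0, m => t :: pvStride ts (m - 1) m
  | _ :: ts, r + 1, m => pvStride ts r m

def pvCnt (n j m : Nat) : Nat := if j < n then (n - j + m - 1) / m else 0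

def pvDist (j b m : Nat) : Nat := if b ≤ j then j - b else j + m - b

def pvPairsOf (loads : List Int) : List (Int × Int) :=
  (List.range loads.length).map (fun w => (loads.getD w 0, (w : Int)))

-- ---------- small arithmetic / list helpers ----------

theorem pv_succ_mod (c m : Nat) (hm : 0 < m) :
    (c + 1) % m = if c % m + 1 = m then 0 else c % m + 1 := by
  have h := Nat.mod_lt c hm
  rw [Nat.add_mod]
  rcases Nat.lt_or_ge 1 m with h1 | h1
  · rw [Nat.mod_eq_of_lt h1]
    split_ifs with h2
    · simp [h2]
    · exact Nat.mod_eq_of_lt (by omega)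
  · interval_cases m <;> simp [Nat.mod_one]

theorem pv_getD_set {α : Type} (l : List α) (n : Nat) (v : α) (j : Nat) (d : α) :
    (l.set n v).getD j d = if j = n ∧ n < l.length then v else l.getD j d := by
  simp only [List.getD, List.getElem?_set]
  split_ifs <;> simp_all

-- ---------- round-robin branch ----------

theorem pvStride_of_ge : ∀ (xs : List (Int × String × String)) (j m : Nat),
    xs.length ≤ j → pvStride xs j m = [] := by
  intro xs
  induction xs with
  | nil => intro j m _; cases j <;> simp [pvStride]
  | cons x ts ih =>
    intro j m hj
    match j, hj with
    | r + 1, hj => simpa [pvStride] using ih r m (by simpa using hj)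

theorem pvCnt_zero (L m : Nat) (hm : 0 < m) : pvCnt (L + 1) 0 m = pvCnt L (m - 1) m + 1 := by
  unfold pvCnt
  rcases Nat.lt_or_ge (m - 1) L with h | h
  · have h1 : L + 1 - 0 + m - 1 = L - (m - 1) + m - 1 + m := by omega
    simp only [if_pos (by omega : (0:Nat) < L + 1), if_pos h, h1]
    rw [Nat.add_div_right _ hm]
  · simp only [if_pos (by omega : (0:Nat) < L + 1)]
    rw [if_neg (by omega)]
    have h1 : L + 1 - 0 + m - 1 = L + m := by omega
    rw [h1, Nat.add_div_right _ hm, Nat.div_eq_of_lt (by omega)]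

theorem pvCnt_succ (L r m : Nat) : pvCnt (L + 1) (r + 1) m = pvCnt L r m := by
  unfold pvCnt
  rcases Nat.lt_or_ge r L with h | h
  · rw [if_pos (by omega), if_pos h]
    congr 1
    omega
  · rw [if_neg (by omega), if_neg (by omega)]

theorem pvFilterMap_stride (m : Nat) (hm : 0 < m) :
    ∀ (xs : List (Int × String × String)) (j : Nat),
      (List.range (pvCnt xs.length j m)).filterMap (fun k => xs[j + m * k]?) = pvStride xs j m := by
  intro xs
  induction xs with
  | nil => intro j; simp [pvStride]
  | cons x ts ih =>
    intro j
    cases j with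
    | zero =>
      rw [show (x :: ts).length = ts.length + 1 from rfl, pvCnt_zero _ _ hm,
        List.range_succ_eq_map, List.filterMap_cons, List.filterMap_map]
      simp only [Nat.mul_zero, Nat.add_zero, List.getElem?_cons_zero]
      show x :: List.filterMap _ _ = pvStride (x :: ts) 0 m
      rw [show pvStride (x :: ts) 0 m = x :: pvStride ts (m - 1) m from rfl]
      congr 1
      rw [← ih (m - 1)]
      apply List.filterMap_congr
      intro k _
      show (x :: ts)[0 + m * (Nat.succ k)]? = ts[(m-1) + m * k]?
      rw [show 0 + m * (Nat.succ k) = ((m-1) + m * k) + 1 by rw [Nat.mul_succ]; omega]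
      exact List.getElem?_cons_succ
    | succ r =>
      rw [show (x :: ts).length = ts.length + 1 from rfl, pvCnt_succ]
      rw [show pvStride (x :: ts) (r+1) m = pvStride ts r m from rfl, ← ih r]
      apply List.filterMap_congr
      intro k _
      show (x :: ts)[r + 1 + m * k]? = ts[r + m * k]?
      rw [show r + 1 + m * k = (r + m * k) + 1 by omega]
      exact List.getElem?_cons_succ


theorem pvSlice_stride (xs : List (Int × String × String)) (j m : Nat) (hm : 0 < m) :
    (PySem.List.slice? xs (some (j : Int)) none (m : Int)).getD [] = pvStride xs j m := by
  unfold PySem.List.slice? PySem.List.sliceIndices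
  rw [if_neg (by omega : ¬ ((m:Int) = 0))]
  simp only [if_neg (by omega : ¬ ((m:Int) < 0)), if_neg (by omega : ¬ ((j:Int) < 0))]
  rcases Nat.lt_or_ge j xs.length with hj | hj
  · rw [min_eq_left (by exact_mod_cast Nat.le_of_lt hj)]
    rw [if_pos (by omega : (0:Int) < (m:Int)), if_pos (by exact_mod_cast hj)]
    have hcount : (((xs.length : Int) - (j:Int) + (m:Int) - 1) / (m:Int)).toNat
        = pvCnt xs.length j m := by
      rw [show ((xs.length : Int) - (j:Int) + (m:Int) - 1) = ((xs.length - j + m - 1 : Nat) : Int) by omega]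
      rw [Int.ofNat_ediv_ofNat, Int.toNat_natCast]
      simp [pvCnt, hj]
    rw [hcount, ← pvFilterMap_stride m hm xs j]
    simp only [Option.getD_some]
    apply List.filterMap_congr
    intro k _
    rw [show (j:Int) + (m:Int) * (k:Int) = ((j + m * k : Nat) : Int) by push_cast; ring,
      Int.toNat_natCast]
  · rw [min_eq_right (by exact_mod_cast hj)]
    rw [if_pos (by omega : (0:Int) < (m:Int)), if_neg (by omega)]
    simp [pvStride_of_ge xs j m hj]


theorem pvFoldA_len (m : Nat) :
    ∀ (l : List (Int × (Int × String × String))) (ps : List (List (Int × String × String))),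
      (l.foldl (fun ps p => PySem.List.pySetD ps (PySem.Int.mod p.1 (m : Int))
        (PySem.List.pyGetD ps (PySem.Int.mod p.1 (m : Int)) [] ++ [p.2])) ps).length = ps.length := by
  intro l
  induction l with
  | nil => intro ps; rfl
  | cons p t ih => intro ps; simp [List.foldl_cons, ih, PySem.List.length_pySetD]

theorem pvFoldA_rr (m : Nat) (hm : 0 < m) :
    ∀ (ts : List (Int × String × String)) (ps : List (List (Int × String × String))) (c j : Nat),
      ps.length = m → j < m →
      ((PySem.List.enumerate ts (c : Int)).foldl
          (fun ps p => PySem.List.pySetD ps (PySem.Int.mod p.1 (m : Int))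
            (PySem.List.pyGetD ps (PySem.Int.mod p.1 (m : Int)) [] ++ [p.2])) ps).getD j []
        = ps.getD j [] ++ pvStride ts (pvDist j (c % m) m) m := by
  intro ts
  induction ts with
  | nil => intro ps c j _ _; simp [PySem.List.enumerate, pvStride]
  | cons t ts ih =>
    intro ps c j hlen hj
    have hb : c % m < m := Nat.mod_lt c hm
    rw [show PySem.List.enumerate (t :: ts) (c : Int) = ((c : Int), t) :: PySem.List.enumerate ts ((c : Int) + 1) from rfl]
    rw [List.foldl_cons]
    rw [show ((c : Int) + 1) = ((c + 1 : Nat) : Int) by push_cast; ring]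
    simp only [PySem.Int.mod_natCast, PySem.List.pySetD_natCast, PySem.List.pyGetD_natCast]
    rw [ih (ps.set (c % m) (ps.getD (c % m) [] ++ [t])) (c + 1) j (by simp [hlen]) hj]
    rw [pv_getD_set, pv_succ_mod c m hm]
    rcases eq_or_ne j (c % m) with heq | hne
    · rw [if_pos ⟨heq, by omega⟩]
      have hd0 : pvDist j (c % m) m = 0 := by unfold pvDist; split_ifs <;> omega
      rw [hd0, show pvStride (t :: ts) 0 m = t :: pvStride ts (m - 1) m from rfl]
      have hd1 : pvDist j (if c % m + 1 = m then 0 else c % m + 1) m = m - 1 := by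
        unfold pvDist; split_ifs <;> omega
      rw [hd1, heq, List.append_assoc]
      rfl
    · rw [if_neg (by tauto)]
      obtain ⟨r, hr⟩ : ∃ r, pvDist j (c % m) m = r + 1 := ⟨pvDist j (c % m) m - 1, by unfold pvDist; split_ifs <;> omega⟩
      rw [hr, show pvStride (t :: ts) (r + 1) m = pvStride ts r m from rfl]
      have hd2 : pvDist j (if c % m + 1 = m then 0 else c % m + 1) m = r := by
        unfold pvDist at hr ⊢; split_ifs at hr ⊢ <;> omega
      rw [hd2]


-- ---------- grouped branch: dictionaries ----------

theorem pvSpeakerWeight_append (v : List (Int × String × String)) (t : Int × String × String) :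
    pvSpeakerWeight (v ++ [t]) = pvSpeakerWeight v + PySem.Str.len t.2.2 := by
  simp [pvSpeakerWeight]

-- B's single grouping pass produces A's speaker dict together with its cached weights
theorem pvFoldBW (ts : List (Int × String × String)) :
    ∀ (d : PySem.Dict String (List (Int × String × String))) (wd : PySem.Dict String Int),
      (∀ k, d.contains k = wd.contains k) →
      (∀ k, wd.getD k 0 = pvSpeakerWeight (d.getD k [])) →
      (ts.foldl (fun bw task =>
          let spk := task.2.1
          if bw.1.contains spk then
            (bw.1.modify spk [] (· ++ [task]), bw.2.modify spk 0 (· + PySem.Str.len task.2.2))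
          else
            (bw.1.insert spk [task], bw.2.insert spk (PySem.Str.len task.2.2))) (d, wd)).1
        = ts.foldl (fun d task => d.modify task.2.1 [] (· ++ [task])) d ∧
      (∀ k, (ts.foldl (fun bw task =>
          let spk := task.2.1
          if bw.1.contains spk then
            (bw.1.modify spk [] (· ++ [task]), bw.2.modify spk 0 (· + PySem.Str.len task.2.2))
          else
            (bw.1.insert spk [task], bw.2.insert spk (PySem.Str.len task.2.2))) (d, wd)).2.getD k 0
        = pvSpeakerWeight ((ts.foldl (fun d task => d.modify task.2.1 [] (· ++ [task])) d).getD k [])) := by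
  induction ts with
  | nil => intro d wd _ hw; exact ⟨rfl, hw⟩
  | cons t ts ih =>
    intro d wd hc hw
    simp only [List.foldl_cons]
    by_cases h : d.contains t.2.1 = true
    · rw [if_pos h]
      exact ih _ _
        (fun k => by simp [PySem.Dict.contains_modify, hc k])
        (fun k => by
          rw [PySem.Dict.getD_modify, PySem.Dict.getD_modify]
          split_ifs with hk
          · simp [pvSpeakerWeight_append, hw t.2.1]
          · exact hw k)
    · rw [if_neg h]
      have hstep : d.modify t.2.1 [] (· ++ [t]) = d.insert t.2.1 [t] := by
        unfold PySem.Dict.modify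
        simp [PySem.Dict.getD_of_not_contains d ([] : List (Int × String × String)) (by simpa using h)]
      rw [hstep]
      exact ih _ _
        (fun k => by simp [PySem.Dict.contains_insert, hc k])
        (fun k => by
          rw [PySem.Dict.getD_insert, PySem.Dict.getD_insert]
          split_ifs with hk
          · simp [pvSpeakerWeight]
          · exact hw k)


theorem pvInsertBy_congr {α : Type} (b1 b2 : α → α → Bool) (x : α) :
    ∀ (l : List α), (∀ y ∈ l, b1 x y = b2 x y) → PySem.List.insertBy b1 x l = PySem.List.insertBy b2 x l := by
  intro l
  induction l with
  | nil => intro _; rfl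
  | cons y ys ih =>
    intro h
    simp only [PySem.List.insertBy, h y (by simp)]
    split_ifs with hb
    · rfl
    · rw [show PySem.List.insertBy b1 x ys = PySem.List.insertBy b2 x ys from
        ih (fun z hz => h z (by simp [hz]))]

theorem pvSorted_rev_congr {α κ : Type} [LinearOrder κ] (xs : List α) (k1 k2 : α → κ)
    (h : ∀ x ∈ xs, k1 x = k2 x) :
    PySem.List.sorted xs k1 true = PySem.List.sorted xs k2 true := by
  rw [PySem.List.sorted_rev_eq_foldl_insertBy, PySem.List.sorted_rev_eq_foldl_insertBy]
  suffices H : ∀ (l : List α) (acc : List α), (∀ x ∈ l, k1 x = k2 x) → (∀ y ∈ acc, k1 y = k2 y) →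
      l.foldl (fun acc x => PySem.List.insertBy (fun a b => decide (k1 b < k1 a)) x acc) acc
        = l.foldl (fun acc x => PySem.List.insertBy (fun a b => decide (k2 b < k2 a)) x acc) acc by
    exact H xs [] h (by simp)
  intro l
  induction l with
  | nil => intro _ _ _; rfl
  | cons x t ih =>
    intro acc hl hacc
    simp only [List.foldl_cons]
    rw [pvInsertBy_congr (fun a b => decide (k1 b < k1 a)) (fun a b => decide (k2 b < k2 a)) x acc (fun y hy => by
      simp [hacc y hy, hl x (by simp)])]
    exact ih _ (fun z hz => hl z (by simp [hz])) (fun y hy => by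
      rcases (PySem.List.mem_insertBy _ _ _ _).mp hy with rfl | hy'
      · exact hl y (by simp)
      · exact hacc y hy')

-- ---------- grouped branch: sorted queue vs argmin scan ----------

theorem pvLexLt_trans {a b c : Int × Int} (h1 : pvLexLt a b) (h2 : pvLexLt b c) : pvLexLt a c := by
  unfold pvLexLt at *; omega

theorem pvInsort_perm (e : Int × Int) : ∀ (l : List (Int × Int)), (pvInsortLex e l).Perm (e :: l) := by
  intro l
  induction l with
  | nil => simp [pvInsortLex]
  | cons q qs ih =>
    simp only [pvInsortLex]
    split_ifs with h
    · exact ((ih.cons q).trans (List.Perm.swap e q qs))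
    · exact List.Perm.refl _

theorem pvInsort_pairwise (e : Int × Int) :
    ∀ (l : List (Int × Int)), l.Pairwise pvLexLt → (∀ q ∈ l, pvLexLt q e ∨ pvLexLt e q) →
      (pvInsortLex e l).Pairwise pvLexLt := by
  intro l
  induction l with
  | nil => intro _ _; simp [pvInsortLex]
  | cons q qs ih =>
    intro hp ht
    simp only [pvInsortLex]
    rcases List.pairwise_cons.mp hp with ⟨hq, hqs⟩
    split_ifs with h
    · refine List.pairwise_cons.mpr ⟨?_, ih hqs (fun z hz => ht z (by simp [hz]))⟩
      intro z hz
      rcases List.mem_cons.mp ((pvInsort_perm e qs).mem_iff.mp hz) with rfl | hz'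
      · exact h
      · exact hq z hz'
    · have he : pvLexLt e q := by
        rcases ht q (by simp) with h' | h'
        · exact absurd h' h
        · exact h'
      refine List.pairwise_cons.mpr ⟨?_, hp⟩
      intro z hz
      rcases List.mem_cons.mp hz with rfl | hz'
      · exact he
      · exact pvLexLt_trans he (hq z hz')

-- A's min(range(num_workers), key=loads) returns the lexicographically least (load, worker)
theorem pvMin?_append_none {f : Int → Int} {xs : List Int} (b : Int)
    (h : PySem.List.min? xs f = none) : PySem.List.min? (xs ++ [b]) f = some b := by
  unfold PySem.List.min? at h ⊢
  rw [List.foldl_append, h]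
  rfl

theorem pvMin?_append_some {f : Int → Int} {xs : List Int} {mm : Int} (b : Int)
    (h : PySem.List.min? xs f = some mm) :
    PySem.List.min? (xs ++ [b]) f = if f b < f mm then some b else some mm := by
  unfold PySem.List.min? at h ⊢
  rw [List.foldl_append, h]
  rfl

theorem pvMinD_range (m : Nat) (f : Int → Int) (w0 : Int)
    (h0 : 0 ≤ w0) (h1 : w0 < (m : Int))
    (hmin : ∀ w : Int, 0 ≤ w → w < (m : Int) → f w0 < f w ∨ (f w0 = f w ∧ w0 ≤ w)) :
    PySem.List.minD (PySem.List.pyRange 0 (m : Int) 1) f 0 = w0 := by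
  suffices H : ∀ (k : Nat), ∀ w0 : Int, 0 ≤ w0 → w0 < (k : Int) →
      (∀ w : Int, 0 ≤ w → w < (k : Int) → f w0 < f w ∨ (f w0 = f w ∧ w0 ≤ w)) →
      PySem.List.min? (PySem.List.pyRange 0 (k : Int) 1) f = some w0 by
    simp [PySem.List.minD, H m w0 h0 h1 hmin]
  intro k
  induction k with
  | zero => intro w0 h0 h1 _; exact absurd h1 (by omega)
  | succ k ih =>
    intro w0 h0 h1 hmin
    have hrange : PySem.List.pyRange 0 ((k+1 : Nat) : Int) 1
        = PySem.List.pyRange 0 (k : Int) 1 ++ [(k : Int)] := by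
      push_cast
      exact PySem.List.pyRange_one_succ_right (by positivity)
    rw [hrange]
    rcases eq_or_lt_of_le (show w0 ≤ (k : Int) by push_cast at h1; omega) with heq | hlt
    · cases h : PySem.List.min? (PySem.List.pyRange 0 (k : Int) 1) f with
      | none => rw [pvMin?_append_none _ h, heq]
      | some mm =>
        have hmem : mm ∈ PySem.List.pyRange 0 (k : Int) 1 := PySem.List.min?_mem h
        rw [PySem.List.mem_pyRange_one] at hmem
        have hd := hmin mm hmem.1 (by push_cast; omega)
        have hfm : f (k : Int) < f mm := by
          rw [← heq]
          rcases hd with h' | ⟨_, h2⟩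
          · exact h'
          · omega
        rw [pvMin?_append_some _ h]
        simp [hfm, heq]
    · have hih := ih w0 h0 (by exact_mod_cast hlt) (fun w hw1 hw2 => hmin w hw1 (by push_cast; omega))
      rw [pvMin?_append_some _ hih]
      have hle : f w0 ≤ f (k : Int) := by
        rcases hmin (k : Int) (by positivity) (by push_cast; omega) with h' | ⟨h', _⟩ <;> omega
      simp [not_lt.mpr hle]


theorem pvPairsOf_set (loads : List Int) (w : Nat) (v : Int) (hw : w < loads.length) :
    pvPairsOf (loads.set w v) = (pvPairsOf loads).set w (v, (w : Int)) := by
  apply List.ext_getElem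
  · simp [pvPairsOf]
  · intro i h1 h2
    simp only [pvPairsOf, List.length_set, List.getElem_map, List.getElem_range,
      List.getElem_set] at *
    split_ifs with hi
    · subst hi; simp [List.getElem?_set, hw]
    · simp [List.getElem?_set, hi]

theorem pvPairsOf_getElem (loads : List Int) (w : Nat) (hw : w < loads.length) :
    (pvPairsOf loads)[w]'(by simpa [pvPairsOf] using hw) = (loads.getD w 0, (w : Int)) := by
  simp [pvPairsOf]

theorem pvPairsOf_decomp (loads : List Int) (w : Nat) (hw : w < loads.length) :
    pvPairsOf loads = (pvPairsOf loads).take w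
      ++ (loads.getD w 0, (w : Int)) :: (pvPairsOf loads).drop (w + 1) := by
  conv_lhs => rw [← List.take_append_drop w (pvPairsOf loads)]
  rw [List.drop_eq_getElem_cons (by simpa [pvPairsOf] using hw), pvPairsOf_getElem loads w hw]

theorem pvTD_snd_ne (loads : List Int) (w : Nat) (hw : w < loads.length) (q : Int × Int)
    (hq : q ∈ (pvPairsOf loads).take w ++ (pvPairsOf loads).drop (w + 1)) :
    q.2 ≠ (w : Int) := by
  rcases List.mem_append.mp hq with hq | hq
  · obtain ⟨i, hi, rfl⟩ := List.mem_iff_getElem.mp hq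
    have hiw : i < w := by have := hi; simp at this; omega
    rw [List.getElem_take]
    have : i < loads.length := by omega
    rw [pvPairsOf_getElem loads i this]
    simp; omega
  · obtain ⟨i, hi, rfl⟩ := List.mem_iff_getElem.mp hq
    rw [List.getElem_drop]
    have hlt : w + 1 + i < loads.length := by
      have := hi; simp [pvPairsOf] at this; omega
    rw [pvPairsOf_getElem loads (w + 1 + i) hlt]
    simp; omega


-- the main joint induction: A's (partitions, loads) loop and B's (assigned, queue) loop
theorem pvLoop (m : Nat) (hm : 0 < m) (weights : PySem.Dict String Int) :
    ∀ (os : List (String × List (Int × String × String)))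
      (ps : List (List (Int × String × String))) (loads : List Int) (queue : List (Int × Int)),
      loads.length = m →
      queue.Perm (pvPairsOf loads) → queue.Pairwise pvLexLt →
      (∀ kv ∈ os, weights.getD kv.1 0 = pvSpeakerWeight kv.2) →
      (os.foldl (fun (st : List (List (Int × String × String)) × List (Int × Int)) kv =>
          let lw := st.2.headD (0, 0)
          let rest := st.2.tail
          (PySem.List.pySetD st.1 lw.2 (PySem.List.pyGetD st.1 lw.2 [] ++ kv.2),
           pvInsortLex (lw.1 + weights.getD kv.1 0, lw.2) rest)) (ps, queue)).1
      = (os.foldl (fun (st : List (List (Int × String × String)) × List Int) kv =>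
          let target := PySem.List.minD (PySem.List.pyRange 0 (m : Int) 1)
            (fun w => PySem.List.pyGetD st.2 w 0) 0
          (PySem.List.pySetD st.1 target (PySem.List.pyGetD st.1 target [] ++ kv.2),
           PySem.List.pySetD st.2 target (PySem.List.pyGetD st.2 target 0 + pvSpeakerWeight kv.2)))
          (ps, loads)).1 := by
  intro os
  induction os with
  | nil => intro ps loads queue _ _ _ _; rfl
  | cons kv os ih =>
    intro ps loads queue hlen hperm hpw hw
    cases queue with
    | nil =>
      exfalso
      have := hperm.length_eq
      simp [pvPairsOf, hlen] at this
      omega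
    | cons h rest =>
      have hmemh : h ∈ pvPairsOf loads := hperm.mem_iff.mp (by simp)
      obtain ⟨w, hwlt, hwh⟩ : ∃ w : Nat, w < loads.length ∧ (loads.getD w 0, (w : Int)) = h := by
        simpa [pvPairsOf] using hmemh
      subst hwh
      -- the head of the sorted queue is exactly A's argmin target
      have htgt : PySem.List.minD (PySem.List.pyRange 0 (m : Int) 1)
          (fun v => PySem.List.pyGetD loads v 0) 0 = (w : Int) := by
        apply pvMinD_range m _ (w : Int) (by positivity) (by exact_mod_cast hlen ▸ hwlt)
        intro v hv0 hvm
        obtain ⟨u, rfl⟩ : ∃ u : Nat, (u : Int) = v := ⟨v.toNat, Int.toNat_of_nonneg hv0⟩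
        have hum : u < loads.length := by rw [hlen]; exact_mod_cast hvm
        have hpmem : (loads.getD u 0, (u : Int)) ∈ pvPairsOf loads := by
          unfold pvPairsOf
          exact List.mem_map.mpr ⟨u, List.mem_range.mpr hum, rfl⟩
        simp only [PySem.List.pyGetD_natCast]
        rcases List.mem_cons.mp (hperm.symm.mem_iff.mp hpmem) with heq | hmem
        · have h1 : loads.getD u 0 = loads.getD w 0 := congrArg Prod.fst heq
          have h2 : (u : Int) = (w : Int) := congrArg Prod.snd heq
          right; exact ⟨h1.symm, le_of_eq h2.symm⟩
        · have := (List.pairwise_cons.mp hpw).1 _ hmem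
          rcases this with h1 | ⟨h1, h2⟩
          · left; exact h1
          · right; exact ⟨h1, le_of_lt (by simpa using h2)⟩
      have hwkv : weights.getD kv.1 0 = pvSpeakerWeight kv.2 := hw kv (by simp)
      simp only [List.foldl_cons, List.headD_cons, List.tail_cons]
      rw [htgt]
      simp only [PySem.List.pySetD_natCast, PySem.List.pyGetD_natCast, hwkv]
      -- invariants for the tail
      have hdecomp := pvPairsOf_decomp loads w hwlt
      have hrest : rest.Perm ((pvPairsOf loads).take w ++ (pvPairsOf loads).drop (w + 1)) := by
        have hmid : (pvPairsOf loads).Perm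
            ((loads.getD w 0, (w : Int)) :: ((pvPairsOf loads).take w ++ (pvPairsOf loads).drop (w + 1))) := by
          conv_lhs => rw [hdecomp]
          exact List.perm_middle
        exact (hperm.trans hmid).cons_inv
      have hperm' : (pvInsortLex (loads.getD w 0 + pvSpeakerWeight kv.2, (w : Int)) rest).Perm
          (pvPairsOf (loads.set w (loads.getD w 0 + pvSpeakerWeight kv.2))) := by
        refine ((pvInsort_perm _ rest).trans (hrest.cons _)).trans ?_
        rw [pvPairsOf_set loads w _ hwlt,
          List.set_eq_take_cons_drop _ (by simpa [pvPairsOf] using hwlt)]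
        exact List.perm_middle.symm
      have hpw' : (pvInsortLex (loads.getD w 0 + pvSpeakerWeight kv.2, (w : Int)) rest).Pairwise pvLexLt := by
        apply pvInsort_pairwise _ rest (List.pairwise_cons.mp hpw).2
        intro q hq
        have hne : q.2 ≠ (w : Int) :=
          pvTD_snd_ne loads w hwlt q (hrest.mem_iff.mp hq)
        rcases lt_trichotomy q.1 (loads.getD w 0 + pvSpeakerWeight kv.2) with h1 | h1 | h1
        · left; left; exact h1
        · rcases lt_or_gt_of_ne (show q.2 ≠ ((loads.getD w 0 + pvSpeakerWeight kv.2, (w : Int)) : Int × Int).2 from hne) with h2 | h2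
          · left; right; exact ⟨h1, h2⟩
          · right; right; exact ⟨h1.symm, h2⟩
        · right; left; exact h1
      have := ih (PySem.List.pySetD ps (w : Int) (PySem.List.pyGetD ps (w : Int) [] ++ kv.2))
        (loads.set w (loads.getD w 0 + pvSpeakerWeight kv.2))
        (pvInsortLex (loads.getD w 0 + pvSpeakerWeight kv.2, (w : Int)) rest)
        (by simp [hlen]) hperm' hpw' (fun z hz => hw z (by simp [hz]))
      simp only [PySem.List.pySetD_natCast, PySem.List.pyGetD_natCast] at this
      exact this

theorem pv_getD_map_const_nil {β : Type} (L : List β) (j : Nat) :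
    (L.map (fun _ => ([] : List (Int × String × String)))).getD j [] = [] := by
  simp only [List.getD, List.getElem?_map]
  cases L[j]? <;> simp

theorem pv_getD_replicate (m w : Nat) : (List.replicate m (0 : Int)).getD w 0 = 0 := by
  simp only [List.getD, List.getElem?_replicate]
  split_ifs <;> simp

-- ===== VERDICT (by name: the statement is the Claim_ definition above) =====
theorem build_worker_partitions_spec : Claim_equal_build_worker_partitions := by
  intro tasks nw g _
  unfold Spec_build_worker_partitions build_worker_partitions build_worker_partitions_alt
  obtain ⟨m, hm, hmN⟩ : ∃ m : Nat, 0 < m ∧ (if nw < 1 then 1 else nw) = (m : Int) :=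
    ⟨(if nw < 1 then 1 else nw).toNat, by split_ifs <;> omega, by split_ifs <;> omega⟩
  rw [hmN]
  by_cases ht : tasks = []
  · simp [ht]
  rw [if_neg ht, if_neg ht]
  by_cases hbr : (!g || (m : Int) == 1) = true
  · rw [if_pos hbr, if_pos hbr]
    -- round-robin branch: bucket j of the append loop is the j-strided slice
    have hlen0 : ((PySem.List.pyRange 0 (m : Int) 1).map
        (fun _ => ([] : List (Int × String × String)))).length = m := by
      simp [PySem.List.length_pyRange_one]
    apply List.ext_getElem
    · simp [pvFoldA_len, hlen0, PySem.List.length_pyRange_one]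
    · intro j h1 h2
      have hj : j < m := by
        simpa [pvFoldA_len, hlen0] using h1
      simp only [List.getElem_map]
      have hA := pvFoldA_rr m hm tasks
        ((PySem.List.pyRange 0 (m : Int) 1).map (fun _ => ([] : List (Int × String × String))))
        0 j hlen0 hj
      rw [show ((0 : Nat) : Int) = (0 : Int) from rfl] at hA
      have hgetd : (((PySem.List.enumerate tasks 0).foldl
          (fun ps p => PySem.List.pySetD ps (PySem.Int.mod p.1 (m : Int))
            (PySem.List.pyGetD ps (PySem.Int.mod p.1 (m : Int)) [] ++ [p.2]))
          ((PySem.List.pyRange 0 (m : Int) 1).map (fun _ => ([] : List (Int × String × String))))))[j]'(by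
            simpa [pvFoldA_len, hlen0] using h1)
          = pvStride tasks j m := by
        rw [← List.getD_eq_getElem _ [] , hA, pv_getD_map_const_nil, Nat.zero_mod]
        simp [pvDist]
      rw [hgetd]
      have hrange : (PySem.List.pyRange 0 (m : Int) 1)[j]'(by
          simpa [PySem.List.length_pyRange_one] using hj) = (j : Int) := by
        rw [PySem.List.getElem_pyRange_one]
        simp
      rw [hrange, pvSlice_stride tasks j m hm]
  · rw [if_neg hbr, if_neg hbr]
    dsimp only
    -- grouped branch
    obtain ⟨hb, hwts⟩ := pvFoldBW tasks PySem.Dict.empty PySem.Dict.empty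
      (fun k => by simp [PySem.Dict.contains_empty]) (fun k => by simp [PySem.Dict.getD_empty, pvSpeakerWeight])
    have hnodup : (tasks.foldl (fun d task => d.modify task.2.1 [] (· ++ [task]))
        PySem.Dict.empty).keys.Nodup :=
      PySem.Dict.nodup_keys_foldl_modify_key tasks (fun task => task.2.1) []
        (fun _ task => (· ++ [task])) PySem.Dict.empty (by simp [PySem.Dict.keys_empty])
    rw [hb]
    have hkeys : ∀ kv ∈ (tasks.foldl (fun d task => d.modify task.2.1 [] (· ++ [task]))
        PySem.Dict.empty).items,
        (tasks.foldl (fun bw task =>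
            let spk := task.2.1
            if bw.1.contains spk then
              (bw.1.modify spk [] (· ++ [task]), bw.2.modify spk 0 (· + PySem.Str.len task.2.2))
            else
              (bw.1.insert spk [task], bw.2.insert spk (PySem.Str.len task.2.2)))
          (PySem.Dict.empty, PySem.Dict.empty)).2.getD kv.1 0 = pvSpeakerWeight kv.2 := by
      intro kv hkv
      rw [hwts kv.1]
      congr 1
      exact PySem.Dict.getD_of_mem_items _ (by simpa using hkv) hnodup []
    rw [pvSorted_rev_congr _ _ _ hkeys]
    congr 1
    have hloads : PySem.List.pyRepeat [(0 : Int)] (m : Int) = List.replicate m (0 : Int) := by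
      rw [PySem.List.pyRepeat_singleton, Int.toNat_natCast]
    have hqueue : (PySem.List.pyRange 0 (m : Int) 1).map (fun w => ((0 : Int), w))
        = pvPairsOf (List.replicate m (0 : Int)) := by
      unfold pvPairsOf
      rw [PySem.List.pyRange_one, List.map_map]
      simp [pv_getD_replicate]
    rw [hloads, hqueue]
    refine Eq.symm (pvLoop m hm _ _ _ _ _ (by simp) (List.Perm.refl _) ?_ ?_)
    · rw [← hqueue]
      rw [PySem.List.pyRange_one, List.map_map]
      apply List.pairwise_map.mpr
      apply List.Pairwise.imp ?_ List.pairwise_lt_range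
      intro a b hab
      right
      exact ⟨rfl, by simpa using hab⟩
    · intro kv hkv
      exact hkeys kv ((PySem.List.mem_sorted _ _ _ _).mp hkv)
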